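-- pv_equiv track=rewrite | github.com/elifesciences/sciencebeam-gym | sciencebeam_gym/inference_model/extract_to_xml.py | _clean_author_name
-- ===== SOURCE A (Python) =====
-- AUTHOR_JUNK_CHARS = ',+*0123456789'
--
-- def _clean_author_name(s):
--   i = len(s)
--   while (
--     i > 0 and
--     (
--       s[i - 1] in AUTHOR_JUNK_CHARS or
--       # only remove dot after special characters
--       (s[i - 1] == '.' and i >= 2 and s[i - 2] in AUTHOR_JUNK_CHARS)
--     )
--   ):
--     i -= 1
--   return s[:i]
-- ===== SOURCE B (Python) =====
-- AUTHOR_JUNK_CHARS = ',+*0123456789'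
--
--
-- def _drop_junk(rev):
--     if not rev:
--         return []
--     c = rev[0]
--     if c in AUTHOR_JUNK_CHARS:
--         return _drop_junk(rev[1:])
--     if c == '.' and len(rev) >= 2 and rev[1] in AUTHOR_JUNK_CHARS:
--         return _drop_junk(rev[1:])
--     return rev
--
--
-- def _clean_author_name(s):
--     return ''.join(reversed(_drop_junk(list(reversed(s)))))
-- ===== Notes on version B (the rewrite author's own statement) =====
-- stated objective: alternative
-- what changed: Replaces A's backward while-loop over string indices with a structural recursion that drops the junk prefix of the reversed character list and reverses the kept suffix back.
import Mathlib
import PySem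

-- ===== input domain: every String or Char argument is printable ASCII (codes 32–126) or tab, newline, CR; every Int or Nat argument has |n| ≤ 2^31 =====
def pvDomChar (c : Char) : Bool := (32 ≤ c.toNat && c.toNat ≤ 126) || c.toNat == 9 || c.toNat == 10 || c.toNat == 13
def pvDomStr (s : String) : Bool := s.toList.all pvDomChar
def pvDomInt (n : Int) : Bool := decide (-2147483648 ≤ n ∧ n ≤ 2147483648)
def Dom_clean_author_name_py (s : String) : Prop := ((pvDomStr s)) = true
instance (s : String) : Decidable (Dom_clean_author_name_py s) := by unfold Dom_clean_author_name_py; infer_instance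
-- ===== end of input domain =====

-- B replaces A's backward index loop by a structural recursion that drops the junk
-- prefix of the reversed character list (objective: alternative decomposition, same cost).

-- AUTHOR_JUNK_CHARS = ',+*0123456789'
def pvJunkChars : List Char := [',', '+', '*', '0', '1', '2', '3', '4', '5', '6', '7', '8', '9']

-- ===== PORT A =====
-- the while loop: i counts down while the trailing character is junk (or a dot after junk)
def pvALoop (cs : List Char) : Nat → Nat
  | 0 => 0
  | i + 1 =>
    if cs.getD i ' ' ∈ pvJunkChars ∨
       (cs.getD i ' ' = '.' ∧ i + 1 ≥ 2 ∧ cs.getD (i - 1) ' ' ∈ pvJunkChars) then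
      pvALoop cs i
    else
      i + 1

def clean_author_name_py (s : String) : String :=
  String.ofList (PySem.List.slice s.toList none (some ((pvALoop s.toList s.toList.length : Nat) : Int)))

-- ===== PORT B =====
-- _drop_junk: structural recursion on the reversed character list
def pvDropJunk : List Char → List Char
  | [] => []
  | c :: rest =>
    if c ∈ pvJunkChars then pvDropJunk rest
    else if c = '.' ∧ rest.headD ' ' ∈ pvJunkChars ∧ rest ≠ [] then pvDropJunk rest
    else c :: rest

def clean_author_name_py_alt (s : String) : String :=
  String.ofList ((pvDropJunk s.toList.reverse).reverse)

-- ===== PRECONDITION & SPEC =====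
def Spec_clean_author_name_py (s : String) (out : String) : Prop := out = clean_author_name_py_alt s
instance (s : String) (out : String) : Decidable (Spec_clean_author_name_py s out) := by unfold Spec_clean_author_name_py; infer_instance

-- ===== CLAIM (what is proved, stated in full; the proofs are below) =====
def Claim_equal_clean_author_name_py : Prop := ∀ (s : String), Dom_clean_author_name_py s → Spec_clean_author_name_py s (clean_author_name_py s)

-- ===== LEMMAS AND PROOFS =====

-- the loop never looks at indices ≥ i, so a trailing character is irrelevant
theorem pvALoop_append (xs : List Char) (c : Char) :
    ∀ i, i ≤ xs.length → pvALoop (xs ++ [c]) i = pvALoop xs i := by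
  intro i
  induction i with
  | zero => intro _; rfl
  | succ i ih =>
    intro hle
    have h1 : (xs ++ [c]).getD i ' ' = xs.getD i ' ' := by
      unfold List.getD
      rw [List.getElem?_append_left (by omega)]
    have h2 : (xs ++ [c]).getD (i - 1) ' ' = xs.getD (i - 1) ' ' := by
      unfold List.getD
      rw [List.getElem?_append_left (by omega)]
    simp only [pvALoop, h1, h2]
    split <;> simp [ih (by omega)]

-- main invariant: A's cut applied to r.reverse is B's drop on r, reversed
theorem pvMain (r : List Char) :
    (r.reverse).take (pvALoop r.reverse r.length) = (pvDropJunk r).reverse := by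
  induction r with
  | nil => rfl
  | cons c t ih =>
    have hlen : (c :: t).reverse = t.reverse ++ [c] := by simp
    have hrl : t.reverse.length = t.length := by simp
    have hgi : (t.reverse ++ [c]).getD t.length ' ' = c := by
      unfold List.getD
      rw [show t.length = t.reverse.length by simp, List.getElem?_append_right (le_refl _)]
      simp
    have hcond : ((t.reverse ++ [c]).getD t.length ' ' ∈ pvJunkChars ∨
        ((t.reverse ++ [c]).getD t.length ' ' = '.' ∧ t.length + 1 ≥ 2 ∧
          (t.reverse ++ [c]).getD (t.length - 1) ' ' ∈ pvJunkChars))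
        ↔ (c ∈ pvJunkChars ∨ (c = '.' ∧ t.headD ' ' ∈ pvJunkChars ∧ t ≠ [])) := by
      rw [hgi]
      cases t with
      | nil => simp
      | cons d t' =>
        have hprev : ((d :: t').reverse ++ [c]).getD ((d :: t').length - 1) ' ' = d := by
          unfold List.getD
          have : (d :: t').reverse = t'.reverse ++ [d] := by simp
          rw [this, List.append_assoc]
          rw [show (d :: t').length - 1 = t'.reverse.length by simp,
            List.getElem?_append_right (le_refl _)]
          simp
        rw [hprev]
        simp [List.headD]
    rw [hlen]
    show (t.reverse ++ [c]).take (pvALoop (t.reverse ++ [c]) (t.length + 1)) = _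
    simp only [pvALoop]
    by_cases h : c ∈ pvJunkChars ∨ (c = '.' ∧ t.headD ' ' ∈ pvJunkChars ∧ t ≠ [])
    · rw [if_pos (hcond.mpr h)]
      rw [pvALoop_append _ _ _ (by simp)]
      have hbound : pvALoop t.reverse t.length ≤ t.length := by
        clear h hcond ih
        generalize t.reverse = xs
        induction t.length with
        | zero => simp [pvALoop]
        | succ i ih2 => simp only [pvALoop]; split <;> omega
      rw [List.take_append_of_le_length (by simpa using hbound)]
      rw [ih]
      have hB : pvDropJunk (c :: t) = pvDropJunk t := by
        rcases h with h | h
        · simp only [pvDropJunk]; rw [if_pos h]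
        · by_cases hc : c ∈ pvJunkChars
          · simp only [pvDropJunk]; rw [if_pos hc]
          · simp only [pvDropJunk]; rw [if_neg hc, if_pos h]
      rw [hB]
    · rw [if_neg (fun hh => h (hcond.mp hh))]
      rw [List.take_of_length_le (by simp)]
      have hnj : c ∉ pvJunkChars := fun hc => h (Or.inl hc)
      have h2 : ¬ (c = '.' ∧ t.headD ' ' ∈ pvJunkChars ∧ t ≠ []) := fun hc => h (Or.inr hc)
      have hB : pvDropJunk (c :: t) = c :: t := by
        simp only [pvDropJunk]
        rw [if_neg hnj, if_neg h2]
      rw [hB]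
      simp

-- ===== VERDICT (by name: the statement is the Claim_ definition above) =====
theorem clean_author_name_py_spec : Claim_equal_clean_author_name_py := by
  intro s _
  unfold Spec_clean_author_name_py clean_author_name_py clean_author_name_py_alt
  rw [PySem.List.slice_to_natCast]
  have := pvMain s.toList.reverse
  simp only [List.reverse_reverse, List.length_reverse] at this
  rw [this]
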